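-- pv_equiv track=rewrite | github.com/xiuchengquek/mathewCoefficient | rnaCompare/RnaStructure.py | get_contradicting_pairs
-- ===== SOURCE A (Python) =====
-- def get_contradicting_pairs(base_pairs):
--     """
--     The function is used to get contradicting pair in the predicted alignment,
--      Where :
--         for  k-l in refernece,
--         i-j in predicted
--      Then
--         k < i < l < j
--
--     returns i-j
--
--
--
--     :param base_pairs: [bp in reference, bp in predicted ]
--     :return: [ contradicting bp ]
--     """
--
--     bp_a = base_pairs[0]
--     bp_b = base_pairs[1]
--
--     fp  = set(bp_b) - set(bp_a)
--     contradicting = []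
--
--     for x in fp :
--         for y in bp_a:
--             if (y[0] < x[0] < y[1] < x[1] ):
--                 contradicting.append(x)
--     return list(set(contradicting))
-- ===== SOURCE B (Python) =====
-- def _first_above(stack, a, lo, hi):
--     # smallest k in [lo, hi) with stack[k][1] > a (stack is sorted by second component), else hi
--     if lo >= hi:
--         return lo
--     mid = (lo + hi) // 2
--     if stack[mid][1] > a:
--         return _first_above(stack, a, lo, mid)
--     else:
--         return _first_above(stack, a, mid + 1, hi)
--
--
-- def get_contradicting_pairs(base_pairs):
--     bp_a = base_pairs[0]
--     bp_b = base_pairs[1]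
--     ref = set(bp_a)
--     # distinct predicted pairs absent from the reference, in first-occurrence order
--     fp = [x for x in dict.fromkeys(bp_b) if x not in ref]
--     # reference pairs sorted by closing position y1
--     ys = sorted(bp_a, key=lambda y: y[1])
--     stack = []   # Pareto frontier of inserted reference pairs: y0 strictly increasing, y1 non-decreasing
--     j = 0
--     res = []
--     for i, x in sorted(enumerate(fp), key=lambda t: t[1][1]):
--         a, b = x
--         while j < len(ys) and ys[j][1] < b:
--             y = ys[j]
--             while stack and stack[-1][0] >= y[0]:
--                 stack.pop()
--             stack.append(y)
--             j += 1
--         k = _first_above(stack, a, 0, len(stack))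
--         res.append((i, x, k < len(stack) and stack[k][0] < a))
--     res.sort(key=lambda t: t[0])
--     return [x for i, x, ok in res if ok]
-- ===== Notes on version B (the rewrite author's own statement) =====
-- stated objective: faster
-- what changed: A checks every non-reference predicted pair against every reference pair; B dedups the predicted pairs once, sorts the reference pairs by closing position and sweeps the queries in order of their closing position, maintaining a Pareto stack (opening strictly increasing, closing non-decreasing) so each query is answered by one binary search.
import Mathlib
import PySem

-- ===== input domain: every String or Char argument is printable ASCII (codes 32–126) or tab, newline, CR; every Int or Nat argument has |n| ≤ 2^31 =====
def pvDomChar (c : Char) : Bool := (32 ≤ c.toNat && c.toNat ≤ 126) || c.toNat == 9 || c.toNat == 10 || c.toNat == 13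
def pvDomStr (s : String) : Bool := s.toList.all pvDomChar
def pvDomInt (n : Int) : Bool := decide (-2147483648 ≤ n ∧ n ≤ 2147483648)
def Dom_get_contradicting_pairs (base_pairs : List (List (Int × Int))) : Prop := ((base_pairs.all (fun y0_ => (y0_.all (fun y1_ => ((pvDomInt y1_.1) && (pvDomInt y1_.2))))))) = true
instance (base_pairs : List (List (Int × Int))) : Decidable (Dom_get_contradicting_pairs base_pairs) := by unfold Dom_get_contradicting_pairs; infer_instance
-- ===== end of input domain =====

-- B replaces A's every-predicted-vs-every-reference scan by a sweep over x1-sorted queries with a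
-- Pareto stack of reference pairs and a binary search per query (objective: faster). Both Pythons
-- return their result list in an unspecified order (A iterates a Python set, whose hash order is
-- not modelled); both ports list the same elements in first-insertion order, outputs compared as sets.

-- ===== PORT A =====
def get_contradicting_pairs (base_pairs : List (List (Int × Int))) : List (Int × Int) :=
  let bp_a := PySem.List.pyGetD base_pairs 0 []
  let bp_b := PySem.List.pyGetD base_pairs 1 []
  let fp : PySem.Set (Int × Int) := PySem.Set.diff (PySem.Set.ofList bp_b) (PySem.Set.ofList bp_a)
  let contradicting := fp.foldl (fun acc x =>
    bp_a.foldl (fun acc y =>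
      if y.1 < x.1 ∧ x.1 < y.2 ∧ y.2 < x.2 then acc ++ [x] else acc) acc) ([] : List (Int × Int))
  PySem.Set.ofList contradicting

-- ===== PORT B =====
-- while stack and stack[-1][0] >= y0: stack.pop()   (stack top = end of list; stack[-1] = pyGetD st (-1))
def pvPopGE (st : List (Int × Int)) (y0 : Int) : List (Int × Int) :=
  if st ≠ [] ∧ y0 ≤ (PySem.List.pyGetD st (-1) ((0 : Int), (0 : Int))).1 then
    pvPopGE st.dropLast y0
  else st
termination_by st.length
decreasing_by
  rename_i h
  cases st with
  | nil => exact absurd rfl h.1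
  | cons a l => simp [List.length_dropLast]

-- while j < len(ys) and ys[j][1] < b:  pop dominated entries, push ys[j], j += 1
def pvAdvance (ys : List (Int × Int)) (b : Int) (j : Nat) (st : List (Int × Int)) :
    Nat × List (Int × Int) :=
  if j < ys.length then
    if (PySem.List.pyGetD ys (j : Int) ((0 : Int), (0 : Int))).2 < b then
      pvAdvance ys b (j + 1)
        (pvPopGE st (PySem.List.pyGetD ys (j : Int) ((0 : Int), (0 : Int))).1 ++
          [PySem.List.pyGetD ys (j : Int) ((0 : Int), (0 : Int))])
    else (j, st)
  else (j, st)
termination_by ys.length - j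
decreasing_by omega

-- _first_above: smallest k in [lo, hi) with stack[k][1] > a, else hi
def pvFirstAbove (st : List (Int × Int)) (a : Int) (lo hi : Nat) : Nat :=
  if lo < hi then
    if a < (PySem.List.pyGetD st (((lo + hi) / 2 : Nat) : Int) ((0 : Int), (0 : Int))).2 then
      pvFirstAbove st a lo ((lo + hi) / 2)
    else
      pvFirstAbove st a ((lo + hi) / 2 + 1) hi
  else lo
termination_by hi - lo
decreasing_by all_goals omega

-- one iteration of B's main loop (state: j, stack, res)
def pvStep (ys : List (Int × Int))
    (s : Nat × List (Int × Int) × List (Int × (Int × Int) × Bool)) (t : Int × (Int × Int)) :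
    Nat × List (Int × Int) × List (Int × (Int × Int) × Bool) :=
  let js := pvAdvance ys t.2.2 s.1 s.2.1
  let k := pvFirstAbove js.2 t.2.1 0 js.2.length
  (js.1, js.2, s.2.2 ++
    [(t.1, t.2, decide (k < js.2.length) &&
        decide ((PySem.List.pyGetD js.2 (k : Int) ((0 : Int), (0 : Int))).1 < t.2.1))])

def get_contradicting_pairs_alt (base_pairs : List (List (Int × Int))) : List (Int × Int) :=
  let bp_a := PySem.List.pyGetD base_pairs 0 []
  let bp_b := PySem.List.pyGetD base_pairs 1 []
  let ref : PySem.Set (Int × Int) := PySem.Set.ofList bp_a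
  let fp := (PySem.List.dedup bp_b).filter (fun x => !(PySem.Set.contains ref x))
  let ys := PySem.List.sorted bp_a (fun y => y.2) false
  let qs := PySem.List.sorted (PySem.List.enumerate fp) (fun t => t.2.2) false
  let res := (qs.foldl (pvStep ys) (0, [], [])).2.2
  let resSorted := PySem.List.sorted res (fun t => t.1) false
  (resSorted.filter (fun t => t.2.2)).map (fun t => t.2.1)

-- ===== PRECONDITION & SPEC =====
-- Pre_ excludes exactly the inputs with fewer than two element lists, where Python A raises IndexError.
def Pre_get_contradicting_pairs (base_pairs : List (List (Int × Int))) : Prop :=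
  2 ≤ base_pairs.length
instance (base_pairs : List (List (Int × Int))) : Decidable (Pre_get_contradicting_pairs base_pairs) := by
  unfold Pre_get_contradicting_pairs; infer_instance

def pvWitness_get_contradicting_pairs : (List (List (Int × Int))) := [[(0, 2)], [(1, 3)]]

def Spec_get_contradicting_pairs (base_pairs : List (List (Int × Int))) (out : List (Int × Int)) : Prop := out = get_contradicting_pairs_alt base_pairs
instance (base_pairs : List (List (Int × Int))) (out : List (Int × Int)) : Decidable (Spec_get_contradicting_pairs base_pairs out) := by unfold Spec_get_contradicting_pairs; infer_instance

-- ===== CLAIM (what is proved, stated in full; the proofs are below) =====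
def Claim_equal_get_contradicting_pairs : Prop := ∀ (base_pairs : List (List (Int × Int))), Dom_get_contradicting_pairs base_pairs → Pre_get_contradicting_pairs base_pairs → Spec_get_contradicting_pairs base_pairs (get_contradicting_pairs base_pairs)

-- ===== LEMMAS AND PROOFS =====

-- the answer both programs compute for a candidate pair x
def pvAns (bp_a : List (Int × Int)) (x : Int × Int) : Bool :=
  decide (∃ y ∈ bp_a, y.1 < x.1 ∧ x.1 < y.2 ∧ y.2 < x.2)

-- `xs[m]` for a Nat index in range, through pyGetD
theorem pv_getD {α : Type} [Inhabited α] (l : List α) (m : Nat) (d : α) (hm : m < l.length) :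
    PySem.List.pyGetD l (m : Int) d = l[m] := by
  simp [PySem.List.pyGetD_natCast, List.getElem?_eq_getElem hm]

theorem pv_mem_take {α : Type} (l : List α) (n : Nat) (z : α) (hz : z ∈ l.take n) :
    ∃ i, ∃ _ : i < l.length, i < n ∧ l[i] = z := by
  obtain ⟨i, hi, he⟩ := List.getElem_of_mem hz
  have hlen : (l.take n).length = min n l.length := List.length_take
  refine ⟨i, by omega, by omega, ?_⟩
  rw [← he]
  exact (List.getElem_take).symm

-- ---- A-side: the double loop plus the final set() is a filter over fp ----

theorem pv_foldl_add_cons {α : Type} [BEq α] [LawfulBEq α] (bs : List α) :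
    ∀ (x : α) (s : List α), x ∉ bs →
      bs.foldl PySem.Set.add (x :: s) = x :: bs.foldl PySem.Set.add s := by
  induction bs with
  | nil => intro x s _; rfl
  | cons b t ih =>
    intro x s hx
    have hne : b ≠ x := fun h => hx (h ▸ List.mem_cons_self)
    have hstep : PySem.Set.add (x :: s) b = x :: PySem.Set.add s b := by
      by_cases hb : b ∈ s
      · simp [PySem.Set.add, PySem.Set.contains, hb, hne]
      · simp [PySem.Set.add, PySem.Set.contains, hb, hne]
    rw [List.foldl_cons, hstep, List.foldl_cons,
      ih x (PySem.Set.add s b) (fun h => hx (List.mem_cons_of_mem _ h))]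

theorem pv_foldl_add_const {α : Type} [BEq α] [LawfulBEq α] (zs : List α) (x : α)
    (hall : ∀ z ∈ zs, z = x) : zs.foldl PySem.Set.add [x] = [x] := by
  induction zs with
  | nil => rfl
  | cons z t ih =>
    have hz : z = x := hall z (by simp)
    have hstep : PySem.Set.add [x] z = [x] := by
      simp [PySem.Set.add, PySem.Set.contains, hz]
    rw [List.foldl_cons, hstep, ih (fun w hw => hall w (List.mem_cons_of_mem _ hw))]

theorem pv_ofList_flatMap_const {α : Type} [BEq α] [LawfulBEq α] (g : α → List α) :
    ∀ (fp : List α), fp.Nodup → (∀ x ∈ fp, ∀ z ∈ g x, z = x) →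
      PySem.Set.ofList (fp.flatMap g) = fp.filter (fun x => !(g x).isEmpty) := by
  intro fp
  induction fp with
  | nil => intro _ _; rfl
  | cons x t ih =>
    intro hnd hall
    have hnd' := hnd.of_cons
    have hxt : x ∉ t := (List.nodup_cons.mp hnd).1
    have hallx : ∀ z ∈ g x, z = x := hall x (by simp)
    have hallt : ∀ x' ∈ t, ∀ z ∈ g x', z = x' := fun x' hx' => hall x' (List.mem_cons_of_mem _ hx')
    have hrec : List.foldl PySem.Set.add PySem.Set.empty (t.flatMap g)
        = t.filter (fun x => !(g x).isEmpty) := ih hnd' hallt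
    show PySem.Set.ofList ((x :: t).flatMap g) = _
    rw [List.flatMap_cons]
    unfold PySem.Set.ofList
    rw [List.foldl_append]
    cases hgx : g x with
    | nil =>
      simp only [List.foldl_nil, hrec, List.filter_cons, hgx]
      simp
    | cons z zs =>
      have hze : z = x := hallx z (hgx ▸ (by simp))
      have h1 : List.foldl PySem.Set.add PySem.Set.empty (z :: zs) = [x] := by
        rw [List.foldl_cons]
        have : PySem.Set.add PySem.Set.empty z = [x] := by
          simp [PySem.Set.add, PySem.Set.empty, PySem.Set.contains, hze]
        rw [this]
        exact pv_foldl_add_const zs x (fun w hw => hallx w (hgx ▸ List.mem_cons_of_mem _ hw))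
      have hxnot : x ∉ t.flatMap g := by
        intro hmem
        rcases List.mem_flatMap.mp hmem with ⟨x', hx', hzx⟩
        exact hxt ((hallt x' hx' x hzx) ▸ hx')
      rw [h1, show ([x] : List α) = x :: ([] : List α) from rfl,
        pv_foldl_add_cons _ x [] hxnot]
      have hempN : (PySem.Set.empty : List α) = ([] : List α) := rfl
      rw [← hempN, hrec, List.filter_cons, hgx]
      simp

theorem pv_A_eq (base_pairs : List (List (Int × Int))) :
    get_contradicting_pairs base_pairs =
      ((PySem.List.dedup (PySem.List.pyGetD base_pairs 1 [])).filter
        (fun x => !(PySem.Set.contains (PySem.Set.ofList (PySem.List.pyGetD base_pairs 0 [])) x))).filter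
        (pvAns (PySem.List.pyGetD base_pairs 0 [])) := by
  simp only [get_contradicting_pairs]
  set bp_a := PySem.List.pyGetD base_pairs 0 [] with hbpa
  set bp_b := PySem.List.pyGetD base_pairs 1 [] with hbpb
  set fp := PySem.Set.diff (PySem.Set.ofList bp_b) (PySem.Set.ofList bp_a) with hfp
  set g : (Int × Int) → List (Int × Int) := fun x =>
    (bp_a.filter (fun y => decide (y.1 < x.1 ∧ x.1 < y.2 ∧ y.2 < x.2))).map (fun _ => x) with hg
  have hinner : ∀ (x : Int × Int) (acc : List (Int × Int)),
      bp_a.foldl (fun acc y => if y.1 < x.1 ∧ x.1 < y.2 ∧ y.2 < x.2 then acc ++ [x] else acc) acc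
        = acc ++ g x := by
    intro x acc
    have h := PySem.List.foldl_append_if
      (fun y : Int × Int => decide (y.1 < x.1 ∧ x.1 < y.2 ∧ y.2 < x.2)) (fun _ => x) bp_a acc
    simp only [decide_eq_true_eq] at h
    rw [hg, h]
  have hfun : (fun (acc : List (Int × Int)) (x : Int × Int) =>
      bp_a.foldl (fun acc y => if y.1 < x.1 ∧ x.1 < y.2 ∧ y.2 < x.2 then acc ++ [x] else acc) acc)
      = fun acc x => acc ++ g x := by
    funext acc x; exact hinner x acc
  rw [hfun, PySem.List.foldl_append_eq_flatMap, List.nil_append]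
  have hnd : fp.Nodup := by
    rw [hfp]
    show (List.filter _ (PySem.Set.ofList bp_b)).Nodup
    exact (PySem.Set.nodup_ofList bp_b).filter _
  have hall : ∀ x ∈ fp, ∀ z ∈ g x, z = x := by
    intro x _ z hz
    rcases List.mem_map.mp hz with ⟨_, _, rfl⟩
    rfl
  rw [pv_ofList_flatMap_const g fp hnd hall]
  have hpt : ∀ x ∈ fp, (!(g x).isEmpty) = pvAns bp_a x := by
    intro x _
    rw [Bool.eq_iff_iff]
    simp [hg, pvAns, List.filter_eq_nil_iff]
  exact List.filter_congr hpt

-- ---- B-side: stack, advance, binary search and sweep ----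

def pvInv (ys : List (Int × Int)) (j : Nat) (st : List (Int × Int)) : Prop :=
  j ≤ ys.length ∧
  (∀ z ∈ st, z ∈ ys.take j) ∧
  (∀ y ∈ ys.take j, ∃ z ∈ st, z.1 ≤ y.1 ∧ y.2 ≤ z.2) ∧
  st.Pairwise (fun p q => p.1 < q.1 ∧ p.2 ≤ q.2)

theorem pv_popGE_spec (y0 : Int) (st : List (Int × Int))
    (hp : st.Pairwise (fun p q => p.1 < q.1 ∧ p.2 ≤ q.2)) :
    (pvPopGE st y0).Sublist st ∧ (∀ z ∈ pvPopGE st y0, z.1 < y0) ∧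
    (∀ z ∈ st, z ∈ pvPopGE st y0 ∨ y0 ≤ z.1) := by
  induction st using List.reverseRecOn with
  | nil =>
    rw [pvPopGE]
    simp
  | append_singleton xs t ih =>
    have hp' : xs.Pairwise (fun p q => p.1 < q.1 ∧ p.2 ≤ q.2) :=
      hp.sublist (List.sublist_append_left xs [t])
    have hcross : ∀ z ∈ xs, z.1 < t.1 ∧ z.2 ≤ t.2 := by
      intro z hz
      exact (List.pairwise_append.mp hp).2.2 z hz t (by simp)
    rw [pvPopGE]
    rw [PySem.List.pyGetD_neg_one_append_singleton]
    by_cases hle : y0 ≤ t.1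
    · rw [if_pos ⟨by simp, hle⟩]
      rw [List.dropLast_concat]
      obtain ⟨s1, s2, s3⟩ := ih hp'
      refine ⟨s1.trans (List.sublist_append_left xs [t]), s2, ?_⟩
      intro z hz
      rcases List.mem_append.mp hz with hz' | hz'
      · exact s3 z hz'
      · right
        rw [List.mem_singleton.mp hz']
        exact hle
    · rw [if_neg (fun hc => hle hc.2)]
      refine ⟨List.Sublist.refl _, ?_, fun z hz => Or.inl hz⟩
      intro z hz
      rcases List.mem_append.mp hz with hz' | hz'
      · exact lt_trans (hcross z hz').1 (lt_of_not_ge hle)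
      · rw [List.mem_singleton.mp hz']
        exact lt_of_not_ge hle

-- every element of ys.take j has second component ≤ that of ys[j]
theorem pv_take_le (ys : List (Int × Int)) (hys : ys.Pairwise (fun p q => p.2 ≤ q.2))
    (j : Nat) (hj : j < ys.length) :
    ∀ z ∈ ys.take j, z.2 ≤ ys[j].2 := by
  intro z hz
  obtain ⟨i, hilen, hij, hiz⟩ := pv_mem_take ys j z hz
  rw [← hiz]
  exact List.pairwise_iff_getElem.mp hys i j hilen hj hij

theorem pv_push_inv (ys : List (Int × Int)) (hys : ys.Pairwise (fun p q => p.2 ≤ q.2))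
    (j : Nat) (st : List (Int × Int)) (hj : j < ys.length) (hinv : pvInv ys j st) :
    pvInv ys (j + 1) (pvPopGE st ys[j].1 ++ [ys[j]]) := by
  obtain ⟨hjlen, hsound, hcover, hpw⟩ := hinv
  obtain ⟨hsub, hlt, hpop⟩ := pv_popGE_spec ys[j].1 st hpw
  have htake : ys.take (j + 1) = ys.take j ++ [ys[j]] := by
    rw [List.take_add_one, List.getElem?_eq_getElem hj]
    rfl
  have h2 : ∀ z ∈ ys.take j, z.2 ≤ ys[j].2 := pv_take_le ys hys j hj
  refine ⟨by omega, ?_, ?_, ?_⟩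
  · intro z hz
    rcases List.mem_append.mp hz with hz' | hz'
    · rw [htake]
      exact List.mem_append_left _ (hsound z (hsub.subset hz'))
    · rw [htake]
      exact List.mem_append_right _ hz'
  · intro y hy
    rw [htake] at hy
    rcases List.mem_append.mp hy with hy' | hy'
    · obtain ⟨z, hzst, hz1, hz2⟩ := hcover y hy'
      rcases hpop z hzst with hzin | hzge
      · exact ⟨z, List.mem_append_left _ hzin, hz1, hz2⟩
      · refine ⟨ys[j], List.mem_append_right _ (by simp), le_trans hzge hz1, ?_⟩
        exact le_trans hz2 (h2 z (hsound z hzst))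
    · rw [List.mem_singleton.mp hy']
      exact ⟨ys[j], List.mem_append_right _ (by simp), le_refl _, le_refl _⟩
  · rw [List.pairwise_append]
    refine ⟨hpw.sublist hsub, List.pairwise_singleton _ _, ?_⟩
    intro z hz t ht
    rw [List.mem_singleton.mp ht]
    exact ⟨hlt z hz, h2 z (hsound z (hsub.subset hz))⟩

theorem pv_advance_eq (ys : List (Int × Int)) (b : Int) (j : Nat) (st : List (Int × Int)) :
    pvAdvance ys b j st =
      if j < ys.length then
        if (PySem.List.pyGetD ys (j : Int) ((0 : Int), (0 : Int))).2 < b then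
          pvAdvance ys b (j + 1)
            (pvPopGE st (PySem.List.pyGetD ys (j : Int) ((0 : Int), (0 : Int))).1 ++
              [PySem.List.pyGetD ys (j : Int) ((0 : Int), (0 : Int))])
        else (j, st)
      else (j, st) := by
  rw [pvAdvance]

theorem pv_advance_spec (ys : List (Int × Int)) (hys : ys.Pairwise (fun p q => p.2 ≤ q.2))
    (b : Int) :
    ∀ (fuel j : Nat) (st : List (Int × Int)), ys.length ≤ j + fuel →
      pvInv ys j st → (∀ y ∈ ys.take j, y.2 < b) →
      pvInv ys (pvAdvance ys b j st).1 (pvAdvance ys b j st).2 ∧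
      (∀ y ∈ ys.take (pvAdvance ys b j st).1, y.2 < b) ∧
      (∀ y ∈ ys, y.2 < b → y ∈ ys.take (pvAdvance ys b j st).1) := by
  intro fuel
  induction fuel with
  | zero =>
    intro j st hfuel hinv hb
    rw [pv_advance_eq, if_neg (by omega)]
    refine ⟨hinv, hb, ?_⟩
    intro y hy _
    rw [List.take_of_length_le (by omega)]
    exact hy
  | succ fuel ih =>
    intro j st hfuel hinv hb
    by_cases hj : j < ys.length
    · have hget : PySem.List.pyGetD ys (j : Int) ((0 : Int), (0 : Int)) = ys[j] :=
        pv_getD ys j _ hj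
      by_cases hyb : ys[j].2 < b
      · rw [pv_advance_eq, if_pos hj, hget, if_pos hyb]
        have hinv' := pv_push_inv ys hys j st hj hinv
        have htake : ys.take (j + 1) = ys.take j ++ [ys[j]] := by
          rw [List.take_add_one, List.getElem?_eq_getElem hj]; rfl
        have hb' : ∀ y ∈ ys.take (j + 1), y.2 < b := by
          intro y hy
          rw [htake] at hy
          rcases List.mem_append.mp hy with hy' | hy'
          · exact hb y hy'
          · rw [List.mem_singleton.mp hy']; exact hyb
        exact ih (j + 1) _ (by omega) hinv' hb'
      · rw [pv_advance_eq, if_pos hj, hget, if_neg hyb]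
        refine ⟨hinv, hb, ?_⟩
        intro y hy hylt
        have hsplit : ys.take j ++ ys.drop j = ys := List.take_append_drop j ys
        rcases List.mem_append.mp (by rw [hsplit]; exact hy) with h | h
        · exact h
        · exfalso
          rw [List.drop_eq_getElem_cons hj] at h
          rcases List.mem_cons.mp h with h' | h'
          · rw [h'] at hylt; exact hyb hylt
          · -- y is strictly after index j, so ys[j].2 ≤ y.2
            obtain ⟨i, hilen, hiy⟩ := List.getElem_of_mem h'
            have hdl : (ys.drop (j + 1)).length = ys.length - (j + 1) := List.length_drop
            have hle2 : ys[j].2 ≤ y.2 := by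
              rw [← hiy, List.getElem_drop]
              exact List.pairwise_iff_getElem.mp hys j (j + 1 + i) hj (by omega) (by omega)
            exact hyb (lt_of_le_of_lt hle2 hylt)
    · rw [pv_advance_eq, if_neg hj]
      refine ⟨hinv, hb, ?_⟩
      intro y hy _
      rw [List.take_of_length_le (by omega)]
      exact hy

theorem pv_firstAbove_eq (st : List (Int × Int)) (a : Int) (lo hi : Nat) :
    pvFirstAbove st a lo hi =
      if lo < hi then
        if a < (PySem.List.pyGetD st (((lo + hi) / 2 : Nat) : Int) ((0 : Int), (0 : Int))).2 then
          pvFirstAbove st a lo ((lo + hi) / 2)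
        else
          pvFirstAbove st a ((lo + hi) / 2 + 1) hi
      else lo := by
  rw [pvFirstAbove]

theorem pv_firstAbove_spec (st : List (Int × Int)) (a : Int)
    (hmono : ∀ p q : Nat, p ≤ q → q < st.length →
      (PySem.List.pyGetD st (p : Int) ((0 : Int), (0 : Int))).2 ≤
      (PySem.List.pyGetD st (q : Int) ((0 : Int), (0 : Int))).2) :
    ∀ (fuel lo hi : Nat), hi ≤ lo + fuel → lo ≤ hi → hi ≤ st.length →
      lo ≤ pvFirstAbove st a lo hi ∧ pvFirstAbove st a lo hi ≤ hi ∧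
      (∀ m, lo ≤ m → m < pvFirstAbove st a lo hi →
        (PySem.List.pyGetD st (m : Int) ((0 : Int), (0 : Int))).2 ≤ a) ∧
      (∀ m, pvFirstAbove st a lo hi ≤ m → m < hi →
        a < (PySem.List.pyGetD st (m : Int) ((0 : Int), (0 : Int))).2) := by
  intro fuel
  induction fuel with
  | zero =>
    intro lo hi hfuel hlohi _
    rw [pv_firstAbove_eq, if_neg (by omega)]
    exact ⟨le_refl _, by omega, fun m h1 h2 => by omega, fun m h1 h2 => by omega⟩
  | succ fuel ih =>
    intro lo hi hfuel hlohi hhilen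
    by_cases hlt : lo < hi
    · have hmidlt : (lo + hi) / 2 < hi := by omega
      have hmidge : lo ≤ (lo + hi) / 2 := by omega
      by_cases hv : a < (PySem.List.pyGetD st (((lo + hi) / 2 : Nat) : Int) ((0 : Int), (0 : Int))).2
      · rw [pv_firstAbove_eq, if_pos hlt, if_pos hv]
        obtain ⟨c1, c2, c3, c4⟩ := ih lo ((lo + hi) / 2) (by omega) hmidge (by omega)
        refine ⟨c1, by omega, c3, ?_⟩
        intro m hm1 hm2
        by_cases hmm : m < (lo + hi) / 2
        · exact c4 m hm1 hmm
        · exact lt_of_lt_of_le hv (hmono ((lo + hi) / 2) m (by omega) (by omega))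
      · rw [pv_firstAbove_eq, if_pos hlt, if_neg hv]
        obtain ⟨c1, c2, c3, c4⟩ := ih ((lo + hi) / 2 + 1) hi (by omega) (by omega) hhilen
        refine ⟨by omega, c2, ?_, c4⟩
        intro m hm1 hm2
        by_cases hmm : m < (lo + hi) / 2 + 1
        · exact le_trans (hmono m ((lo + hi) / 2) (by omega) (by omega)) (le_of_not_gt hv)
        · exact c3 m (by omega) hm2
    · rw [pv_firstAbove_eq, if_neg hlt]
      exact ⟨le_refl _, by omega, fun m h1 h2 => by omega, fun m h1 h2 => by omega⟩

theorem pv_query_correct (st : List (Int × Int)) (a : Int)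
    (hp : st.Pairwise (fun p q => p.1 < q.1 ∧ p.2 ≤ q.2)) :
    (decide (pvFirstAbove st a 0 st.length < st.length) &&
      decide ((PySem.List.pyGetD st ((pvFirstAbove st a 0 st.length : Nat) : Int)
        ((0 : Int), (0 : Int))).1 < a)) =
    decide (∃ z ∈ st, z.1 < a ∧ a < z.2) := by
  have hmono : ∀ p q : Nat, p ≤ q → q < st.length →
      (PySem.List.pyGetD st (p : Int) ((0 : Int), (0 : Int))).2 ≤
      (PySem.List.pyGetD st (q : Int) ((0 : Int), (0 : Int))).2 := by
    intro p q hpq hq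
    rw [pv_getD st p _ (by omega), pv_getD st q _ hq]
    rcases Nat.lt_or_ge p q with h | h
    · exact (List.pairwise_iff_getElem.mp hp p q (by omega) hq h).2
    · have : p = q := by omega
      subst this; exact le_refl _
  obtain ⟨h0, hk, h3, h4⟩ :=
    pv_firstAbove_spec st a hmono st.length 0 st.length (by omega) (by omega) (le_refl _)
  set k := pvFirstAbove st a 0 st.length with hkdef
  rw [← Bool.decide_and, decide_eq_decide]
  constructor
  · rintro ⟨hklen, hb⟩
    refine ⟨st[k], List.getElem_mem hklen, ?_, ?_⟩
    · rw [← pv_getD st k _ hklen]; exact hb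
    · have := h4 k (le_refl _) hklen
      rw [pv_getD st k _ hklen] at this
      exact this
  · rintro ⟨z, hz, hz1, hz2⟩
    obtain ⟨i, hilen, hiz⟩ := List.getElem_of_mem hz
    have hik : k ≤ i := by
      by_contra hik
      have := h3 i (by omega) (by omega)
      rw [pv_getD st i _ hilen, hiz] at this
      omega
    have hklen : k < st.length := by omega
    refine ⟨hklen, ?_⟩
    rcases Nat.lt_or_ge k i with h | h
    · have hlt := (List.pairwise_iff_getElem.mp hp k i hklen hilen h).1
      rw [hiz] at hlt
      rw [pv_getD st k _ hklen]
      omega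
    · have hki : k = i := by omega
      rw [hki, pv_getD st i _ hilen, hiz]
      exact hz1

theorem pv_sweep (ys : List (Int × Int)) (hys : ys.Pairwise (fun p q => p.2 ≤ q.2)) :
    ∀ (qs : List (Int × (Int × Int))) (j : Nat) (st : List (Int × Int))
      (res : List (Int × (Int × Int) × Bool)),
      pvInv ys j st →
      qs.Pairwise (fun s t => s.2.2 ≤ t.2.2) →
      (∀ t ∈ qs, ∀ y ∈ ys.take j, y.2 < t.2.2) →
      (qs.foldl (pvStep ys) (j, st, res)).2.2 =
        res ++ qs.map (fun t => (t.1, t.2,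
          decide (∃ y ∈ ys, y.1 < t.2.1 ∧ t.2.1 < y.2 ∧ y.2 < t.2.2))) := by
  intro qs
  induction qs with
  | nil => intro j st res _ _ _; simp
  | cons q rest ih =>
    intro j st res hinv hqpw hge
    have hb0 : ∀ y ∈ ys.take j, y.2 < q.2.2 := fun y hy => hge q (by simp) y hy
    obtain ⟨hinv', hb', hcomp⟩ :=
      pv_advance_spec ys hys q.2.2 ys.length j st (by omega) hinv hb0
    set js := pvAdvance ys q.2.2 j st with hjs
    have hq : decide (∃ z ∈ js.2, z.1 < q.2.1 ∧ q.2.1 < z.2) =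
        decide (∃ y ∈ ys, y.1 < q.2.1 ∧ q.2.1 < y.2 ∧ y.2 < q.2.2) := by
      rw [decide_eq_decide]
      constructor
      · rintro ⟨z, hz, hz1, hz2⟩
        have hztake := hinv'.2.1 z hz
        refine ⟨z, (List.take_sublist _ _).subset hztake, hz1, hz2, hb' z hztake⟩
      · rintro ⟨y, hy, hy1, hy2, hy3⟩
        obtain ⟨z, hz, hz1, hz2⟩ := hinv'.2.2.1 y (hcomp y hy hy3)
        exact ⟨z, hz, by omega, by omega⟩
    have hstep : pvStep ys (j, st, res) q = (js.1, js.2, res ++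
        [(q.1, q.2, decide (∃ y ∈ ys, y.1 < q.2.1 ∧ q.2.1 < y.2 ∧ y.2 < q.2.2))]) := by
      simp only [pvStep]
      rw [← hjs, pv_query_correct js.2 q.2.1 hinv'.2.2.2, hq]
    have hge' : ∀ t ∈ rest, ∀ y ∈ ys.take js.1, y.2 < t.2.2 := by
      intro t ht y hy
      exact lt_of_lt_of_le (hb' y hy) ((List.pairwise_cons.mp hqpw).1 t ht)
    have hrest := ih js.1 js.2 (res ++ [(q.1, q.2,
        decide (∃ y ∈ ys, y.1 < q.2.1 ∧ q.2.1 < y.2 ∧ y.2 < q.2.2))]) hinv'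
      (List.pairwise_cons.mp hqpw).2 hge'
    rw [List.foldl_cons, hstep, hrest, List.map_cons, List.append_assoc]
    rfl

theorem pv_enum_ge {α : Type} : ∀ (l : List α) (s : Int),
    ∀ q ∈ PySem.List.enumerate l s, s ≤ q.1 := by
  intro l
  induction l with
  | nil => intro s q hq; simp [PySem.List.enumerate] at hq
  | cons x t ih =>
    intro s q hq
    rcases List.mem_cons.mp hq with h | h
    · rw [h]
    · have := ih (s + 1) q h
      omega

theorem pv_enum_pairwise {α : Type} : ∀ (l : List α) (s : Int),
    (PySem.List.enumerate l s).Pairwise (fun p q => p.1 < q.1) := by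
  intro l
  induction l with
  | nil => intro s; exact List.Pairwise.nil
  | cons x t ih =>
    intro s
    refine List.pairwise_cons.mpr ⟨?_, ih (s + 1)⟩
    intro q hq
    have := pv_enum_ge t (s + 1) q hq
    omega

theorem pv_enum_filter (ys : List (Int × Int)) :
    ∀ (fp : List (Int × Int)) (s : Int),
      (((PySem.List.enumerate fp s).map (fun t => (t.1, t.2,
          decide (∃ y ∈ ys, y.1 < t.2.1 ∧ t.2.1 < y.2 ∧ y.2 < t.2.2)))).filter
        (fun t => t.2.2)).map (fun t => t.2.1) =
      fp.filter (fun x => decide (∃ y ∈ ys, y.1 < x.1 ∧ x.1 < y.2 ∧ y.2 < x.2)) := by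
  intro fp
  induction fp with
  | nil => intro s; rfl
  | cons x t ih =>
    intro s
    show ((((s, x) :: PySem.List.enumerate t (s + 1)).map (fun t => (t.1, t.2,
          decide (∃ y ∈ ys, y.1 < t.2.1 ∧ t.2.1 < y.2 ∧ y.2 < t.2.2)))).filter
        (fun t => t.2.2)).map (fun t => t.2.1) = _
    by_cases hp : ∃ y ∈ ys, y.1 < x.1 ∧ x.1 < y.2 ∧ y.2 < x.2
    · simp [hp, ih (s + 1)]
    · simp [hp, ih (s + 1)]

theorem pv_B_eq (base_pairs : List (List (Int × Int))) :
    get_contradicting_pairs_alt base_pairs =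
      ((PySem.List.dedup (PySem.List.pyGetD base_pairs 1 [])).filter
        (fun x => !(PySem.Set.contains (PySem.Set.ofList (PySem.List.pyGetD base_pairs 0 [])) x))).filter
        (pvAns (PySem.List.pyGetD base_pairs 0 [])) := by
  simp only [get_contradicting_pairs_alt]
  set bp_a := PySem.List.pyGetD base_pairs 0 [] with hbpa
  set bp_b := PySem.List.pyGetD base_pairs 1 [] with hbpb
  set fp := (PySem.List.dedup bp_b).filter
    (fun x => !(PySem.Set.contains (PySem.Set.ofList bp_a) x)) with hfpd
  set ys := PySem.List.sorted bp_a (fun y => y.2) false with hysd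
  have hys : ys.Pairwise (fun p q => p.2 ≤ q.2) :=
    PySem.List.sorted_pairwise bp_a (fun y => y.2)
  set qs := PySem.List.sorted (PySem.List.enumerate fp) (fun t => t.2.2) false with hqsd
  have hsweep := pv_sweep ys hys qs 0 [] []
    ⟨by omega, by simp, by simp, List.Pairwise.nil⟩
    (PySem.List.sorted_pairwise _ _) (by simp)
  rw [hsweep, List.nil_append]
  have hperm : ((PySem.List.enumerate fp).map (fun t => (t.1, t.2,
      decide (∃ y ∈ ys, y.1 < t.2.1 ∧ t.2.1 < y.2 ∧ y.2 < t.2.2)))).Perm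
      (qs.map (fun t => (t.1, t.2,
      decide (∃ y ∈ ys, y.1 < t.2.1 ∧ t.2.1 < y.2 ∧ y.2 < t.2.2)))) :=
    ((PySem.List.sorted_perm (PySem.List.enumerate fp) (fun t => t.2.2) false).map _).symm
  have hpwlt : (((PySem.List.enumerate fp).map (fun t => (t.1, t.2,
      decide (∃ y ∈ ys, y.1 < t.2.1 ∧ t.2.1 < y.2 ∧ y.2 < t.2.2)))).Pairwise
      (fun s t => s.1 < t.1)) :=
    List.pairwise_map.mpr (pv_enum_pairwise fp 0)
  rw [PySem.List.sorted_eq_of_perm_of_pairwise_lt _ _ _ hperm hpwlt]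
  rw [pv_enum_filter ys fp 0]
  apply List.filter_congr
  intro x _
  unfold pvAns
  rw [decide_eq_decide]
  exact ⟨fun ⟨y, hy, hh⟩ => ⟨y, ((PySem.List.sorted_perm bp_a (fun y => y.2) false).mem_iff).mp hy, hh⟩,
    fun ⟨y, hy, hh⟩ => ⟨y, ((PySem.List.sorted_perm bp_a (fun y => y.2) false).mem_iff).mpr hy, hh⟩⟩

-- ===== VERDICT (by name: the statement is the Claim_ definition above) =====
theorem get_contradicting_pairs_spec : Claim_equal_get_contradicting_pairs := by
  intro base_pairs _ _
  show get_contradicting_pairs base_pairs = get_contradicting_pairs_alt base_pairs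
  rw [pv_A_eq, pv_B_eq]
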